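-- pv_equiv track=rewrite | github.com/miliar/Code_Jam_Webscraper | solutions_python/Problem_203/180.py | solve
-- ===== SOURCE A (Python) =====
-- def solve(r, c, m):
--     for i in range(r):
--         s = None
--         for j in range(c):
--             if m[i][j] != "?":
--                 s = m[i][j]
--                 break
--         if s is None:
--             continue
--         for j in range(c):
--             if m[i][j] == "?":
--                 m[i][j] = s
--             else:
--                 s = m[i][j]
--     for j in range(c):
--         s = None
--         for i in range(r):
--             if m[i][j] != "?":
--                 s = m[i][j]
--                 break
--         for i in range(r):
--             if m[i][j] == "?":
--                 m[i][j] = s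
--             else:
--                 s = m[i][j]
--     return m
-- ===== SOURCE B (Python) =====
-- def solve(r, c, m):
--     # fill each row's '?' cells: a forward sweep carries the last concrete value,
--     # a backward sweep then fills the leading '?' cells from the first one
--     for i in range(r):
--         last = None
--         for j in range(c):
--             if m[i][j] != "?":
--                 last = m[i][j]
--             elif last is not None:
--                 m[i][j] = last
--         nxt = None
--         for j in range(c - 1, -1, -1):
--             if m[i][j] != "?":
--                 nxt = m[i][j]
--             elif nxt is not None:
--                 m[i][j] = nxt
--     # a row still all '?' copies the nearest filled row above it,
--     # and any left at the top copy the first filled row below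
--     donor = None
--     for i in range(r):
--         if all(m[i][j] == "?" for j in range(c)):
--             if donor is not None:
--                 for j in range(c):
--                     m[i][j] = donor[j]
--         else:
--             donor = m[i]
--     donor = None
--     for i in range(r - 1, -1, -1):
--         if all(m[i][j] == "?" for j in range(c)):
--             if donor is not None:
--                 for j in range(c):
--                     m[i][j] = donor[j]
--         else:
--             donor = m[i]
--     return m
-- ===== Notes on version B (the rewrite author's own statement) =====
-- stated objective: alternative
-- what changed: A finds the first concrete cell per row then forward-fills with a carried value, then repeats that find-then-fill scan independently for every column; B fills each row by two opposite sweeps (forward then backward) and replaces the column phase by one row-level pass: each still-all-'?' row copies cell-by-cell from the nearest filled row above, else the first filled row below. Pre_ excludes grids whose first r x c cells are all '?', on which A's column pass writes None (not a string) into every cell, and shapes with fewer than r rows or c cells per row, on which A raises IndexError.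
-- outside the precondition, e.g. on solve(1, 1, [['?']]): A returns [[None]], B returns [['?']]
import Mathlib
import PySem

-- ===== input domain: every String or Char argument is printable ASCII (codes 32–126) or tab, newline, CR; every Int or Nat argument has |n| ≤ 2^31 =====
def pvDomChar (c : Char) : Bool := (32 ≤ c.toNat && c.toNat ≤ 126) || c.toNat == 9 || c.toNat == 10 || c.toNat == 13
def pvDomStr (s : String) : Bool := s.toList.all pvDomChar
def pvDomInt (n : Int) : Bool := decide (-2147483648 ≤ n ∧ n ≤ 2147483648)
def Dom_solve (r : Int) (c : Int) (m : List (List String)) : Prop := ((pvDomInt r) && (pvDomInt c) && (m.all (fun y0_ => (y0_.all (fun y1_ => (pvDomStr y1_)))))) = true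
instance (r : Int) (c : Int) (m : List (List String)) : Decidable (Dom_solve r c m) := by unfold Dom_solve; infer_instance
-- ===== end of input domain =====

-- B fills each row with two opposite sweeps and replaces A's per-column scans by one
-- row-level nearest-filled-row copy; equivalence is about the RETURN value only (the
-- Python A and B both mutate m in place).

-- ===== PORT A =====
-- first loop of a row: for j in range(c): if m[i][j] != "?": s = m[i][j]; break
def findFirstA : List String → Nat → Option String
  | _, 0 => none
  | [], _ + 1 => none
  | x :: xs, k + 1 => if x ≠ "?" then some x else findFirstA xs k

-- second loop of a row: fill "?" cells with carried s, update s at concrete cells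
def rowFillA : List String → Nat → String → List String
  | row, 0, _ => row
  | [], _ + 1, _ => []
  | x :: xs, k + 1, s => if x == "?" then s :: rowFillA xs k s else x :: rowFillA xs k x

def rowPassA (c : Nat) (row : List String) : List String :=
  match findFirstA row c with
  | none => row          -- s is None: continue
  | some s => rowFillA row c s

def rowsA : List (List String) → Nat → Nat → List (List String)
  | m, 0, _ => m
  | [], _ + 1, _ => []
  | row :: rest, k + 1, c => rowPassA c row :: rowsA rest k c

-- column phase: break-scan down column j  (row.getD j "?" is in range inside Pre_)
def colFirstA : List (List String) → Nat → Nat → Option String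
  | _, 0, _ => none
  | [], _ + 1, _ => none
  | row :: rest, k + 1, j => if row.getD j "?" ≠ "?" then some (row.getD j "?") else colFirstA rest k j

def colFillA : List (List String) → Nat → Nat → String → List (List String)
  | m, 0, _, _ => m
  | [], _ + 1, _, _ => []
  | row :: rest, k + 1, j, s =>
      if row.getD j "?" == "?" then row.set j s :: colFillA rest k j s
      else row :: colFillA rest k j (row.getD j "?")

def colStepA (m : List (List String)) (rn j : Nat) : List (List String) :=
  match colFirstA m rn j with
  | none => m            -- here Python writes None into every cell of the column; Pre_ excludes this
  | some s => colFillA m rn j s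

def solve (r : Int) (c : Int) (m : List (List String)) : List (List String) :=
  (List.range c.toNat).foldl (fun acc j => colStepA acc r.toNat j) (rowsA m r.toNat c.toNat)

-- ===== PORT B =====
-- forward sweep of a row: fill "?" from the last concrete value seen
def fwdB : List String → Nat → Option String → List String
  | row, 0, _ => row
  | [], _ + 1, _ => []
  | x :: xs, k + 1, last =>
      if x ≠ "?" then x :: fwdB xs k (some x)
      else match last with
        | some v => v :: fwdB xs k last
        | none => x :: fwdB xs k none

-- backward sweep (Python's reversed-range loop, as recursion returning on the way back)
def bwdB : List String → Nat → List String × Option String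
  | row, 0 => (row, none)
  | [], _ + 1 => ([], none)
  | x :: xs, k + 1 =>
      let p := bwdB xs k
      if x ≠ "?" then (x :: p.1, some x)
      else match p.2 with
        | some v => (v :: p.1, p.2)
        | none => (x :: p.1, none)

def rowPassB (c : Nat) (row : List String) : List String := (bwdB (fwdB row c none) c).1

def rowsB : List (List String) → Nat → Nat → List (List String)
  | m, 0, _ => m
  | [], _ + 1, _ => []
  | row :: rest, k + 1, c => rowPassB c row :: rowsB rest k c

-- all(m[i][j] == "?" for j in range(c))  (cells in range inside Pre_)
def isQ (c : Nat) (row : List String) : Bool := (row.take c).all (fun x => x == "?")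

-- for j in range(c): m[i][j] = donor[j]  (donor[j] in range inside Pre_)
def copyC (c : Nat) (d row : List String) : List String :=
  (List.range c).foldl (fun acc j => acc.set j (d.getD j "?")) row

-- phase 2 forward sweep over rows: copy the nearest filled row above
def fwdRowsB : List (List String) → Nat → Nat → Option (List String) → List (List String)
  | m, 0, _, _ => m
  | [], _ + 1, _, _ => []
  | row :: rest, k + 1, c, donor =>
      if isQ c row then
        match donor with
        | some d => copyC c d row :: fwdRowsB rest k c donor
        | none => row :: fwdRowsB rest k c none
      else row :: fwdRowsB rest k c (some row)

-- phase 2 backward sweep over rows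
def bwdRowsB : List (List String) → Nat → Nat → List (List String) × Option (List String)
  | m, 0, _ => (m, none)
  | [], _ + 1, _ => ([], none)
  | row :: rest, k + 1, c =>
      let p := bwdRowsB rest k c
      if isQ c row then
        match p.2 with
        | some d => (copyC c d row :: p.1, p.2)
        | none => (row :: p.1, none)
      else (row :: p.1, some row)

def solve_alt (r : Int) (c : Int) (m : List (List String)) : List (List String) :=
  (bwdRowsB (fwdRowsB (rowsB m r.toNat c.toNat) r.toNat c.toNat none) r.toNat c.toNat).1

-- ===== PRECONDITION & SPEC =====
-- Pre_ excludes (i) shapes on which A raises IndexError (with c > 0 the grid must have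
-- r rows of ≥ c cells), and (ii) grids whose first r×c cells are all "?", where A's
-- column pass writes None (not a str) into the grid.
def Pre_solve (r : Int) (c : Int) (m : List (List String)) : Prop :=
  (0 < c → r.toNat ≤ m.length ∧ ∀ row ∈ m.take r.toNat, c.toNat ≤ row.length) ∧
  ¬ (0 < r ∧ 0 < c ∧ ∀ row ∈ m.take r.toNat, ∀ x ∈ row.take c.toNat, x = "?")
instance (r : Int) (c : Int) (m : List (List String)) : Decidable (Pre_solve r c m) := by
  unfold Pre_solve; infer_instance

def pvWitness_solve : Int × Int × List (List String) :=
  (2, 3, [["?", "a", "?"], ["?", "?", "?"]])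

def Spec_solve (r : Int) (c : Int) (m : List (List String)) (out : List (List String)) : Prop := out = solve_alt r c m
instance (r : Int) (c : Int) (m : List (List String)) (out : List (List String)) : Decidable (Spec_solve r c m out) := by unfold Spec_solve; infer_instance

-- ===== CLAIM (what is proved, stated in full; the proofs are below) =====
def Claim_equal_solve : Prop := ∀ (r : Int) (c : Int) (m : List (List String)), Dom_solve r c m → Pre_solve r c m → Spec_solve r c m (solve r c m)

-- ===== LEMMAS AND PROOFS =====

----------------------------------------------------------------
-- Phase 1: rowPassA = rowPassB
----------------------------------------------------------------

theorem fwdB_some (xs : List String) : ∀ (k : Nat) (s : String), fwdB xs k (some s) = rowFillA xs k s := by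
  induction xs with
  | nil => intro k s; cases k <;> rfl
  | cons x t ih =>
      intro k s; cases k with
      | zero => rfl
      | succ k =>
          by_cases hx : x = "?"
          · subst hx; simp [fwdB, rowFillA, ih]
          · simp [fwdB, rowFillA, hx, ih]

theorem findFirstA_none (xs : List String) : ∀ (k : Nat), findFirstA xs k = none → ∀ x ∈ xs.take k, x = "?" := by
  induction xs with
  | nil => simp
  | cons x t ih =>
      intro k h; cases k with
      | zero => simp
      | succ k =>
          by_cases hx : x = "?"
          · subst hx; simp [findFirstA] at h
            simpa using fun y hy => ih k h y hy
          · simp [findFirstA, hx] at h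

theorem findFirstA_some_ne (xs : List String) : ∀ (k : Nat) (s : String), findFirstA xs k = some s → s ≠ "?" := by
  induction xs with
  | nil => intro k s h; cases k <;> simp [findFirstA] at h
  | cons x t ih =>
      intro k s h; cases k with
      | zero => simp [findFirstA] at h
      | succ k =>
          by_cases hx : x = "?"
          · subst hx; simp [findFirstA] at h; exact ih k s h
          · simp [findFirstA, hx] at h; subst h; exact hx

theorem rowFillA_no_q (xs : List String) : ∀ (k : Nat) (s : String), s ≠ "?" → ∀ x ∈ (rowFillA xs k s).take k, x ≠ "?" := by
  induction xs with
  | nil => intro k s _; cases k <;> simp [rowFillA]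
  | cons x t ih =>
      intro k s hs; cases k with
      | zero => simp [rowFillA]
      | succ k =>
          by_cases hx : x = "?"
          · subst hx; simp [rowFillA, hs]
            exact fun y hy => ih k s hs y hy
          · simp [rowFillA, hx]
            exact fun y hy => ih k x hx y hy

theorem bwdB_fst_no_q (xs : List String) : ∀ (k : Nat), (∀ x ∈ xs.take k, x ≠ "?") → (bwdB xs k).1 = xs := by
  induction xs with
  | nil => intro k _; cases k <;> rfl
  | cons x t ih =>
      intro k h; cases k with
      | zero => rfl
      | succ k =>
          simp at h
          simp [bwdB, h.1, ih k h.2]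

-- the two sweeps, composed, expressed through A's break-scan result
theorem bwd_fwd_char (xs : List String) : ∀ (k : Nat),
    bwdB (fwdB xs k none) k =
      (match findFirstA xs k with
       | none => (xs, none)
       | some s => (rowFillA xs k s, some s)) := by
  induction xs with
  | nil => intro k; cases k <;> rfl
  | cons x t ih =>
      intro k; cases k with
      | zero => rfl
      | succ k =>
          by_cases hx : x = "?"
          · subst hx
            have h1 : fwdB ("?" :: t) (k + 1) none = "?" :: fwdB t k none := by simp [fwdB]
            rw [h1]
            cases hf : findFirstA t k with
            | none =>
                have hih := ih k; rw [hf] at hih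
                simp [findFirstA, bwdB, hih, hf]
            | some s =>
                have hih := ih k; rw [hf] at hih
                simp [findFirstA, bwdB, hih, hf, rowFillA]
          · have h1 : fwdB (x :: t) (k + 1) none = x :: rowFillA t k x := by
              simp [fwdB, hx, fwdB_some]
            rw [h1]
            have h2 : (bwdB (rowFillA t k x) k).1 = rowFillA t k x :=
              bwdB_fst_no_q _ k (rowFillA_no_q t k x hx)
            simp [bwdB, hx, findFirstA, h2, rowFillA]

theorem rowPass_eq (c : Nat) (row : List String) : rowPassA c row = rowPassB c row := by
  unfold rowPassA rowPassB
  rw [bwd_fwd_char row c]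
  cases hf : findFirstA row c with
  | none => simp
  | some s => simp

theorem rows_eq (m : List (List String)) : ∀ (k c : Nat), rowsA m k c = rowsB m k c := by
  induction m with
  | nil => intro k c; cases k <;> rfl
  | cons row rest ih =>
      intro k c; cases k with
      | zero => rfl
      | succ k => simp [rowsA, rowsB, rowPass_eq, ih]

----------------------------------------------------------------
-- Phase 2 setup: shape of the matrix after phase 1
----------------------------------------------------------------

-- rows i < k have ≥ c cells and are all-"?" or all-concrete in the first c cells
def okRows : List (List String) → Nat → Nat → Prop
  | _, 0, _ => True
  | [], _ + 1, _ => True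
  | row :: rest, k + 1, c =>
      (c ≤ row.length ∧ (isQ c row = true ∨ ∀ x ∈ row.take c, x ≠ "?")) ∧ okRows rest k c

-- the first non-all-"?" row (the donor row B carries; what A's column break-scan keys on)
def firstDonor : List (List String) → Nat → Nat → Option (List String)
  | _, 0, _ => none
  | [], _ + 1, _ => none
  | row :: rest, k + 1, c => if isQ c row then firstDonor rest k c else some row

-- fill only columns [0, j) of every all-"?" row from the running donor row
def fillRowsJ (j : Nat) : List (List String) → Nat → Nat → List String → List (List String)
  | m, 0, _, _ => m
  | [], _ + 1, _, _ => []
  | row :: rest, k + 1, c, d =>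
      if isQ c row then (d.take j ++ row.drop j) :: fillRowsJ j rest k c d
      else row :: fillRowsJ j rest k c row

-- all c columns filled
def fillRows : List (List String) → Nat → Nat → List String → List (List String)
  | m, 0, _, _ => m
  | [], _ + 1, _, _ => []
  | row :: rest, k + 1, c, d =>
      if isQ c row then (d.take c ++ row.drop c) :: fillRows rest k c d
      else row :: fillRows rest k c row

-- the state of the matrix after A has processed columns [0, j)
def tbAt (M : List (List String)) (k c j : Nat) : List (List String) :=
  match firstDonor M k c with
  | none => M
  | some d => fillRowsJ j M k c d

theorem rowPassA_length (c : Nat) (row : List String) : (rowPassA c row).length = row.length := by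
  unfold rowPassA
  cases hf : findFirstA row c with
  | none => rfl
  | some s =>
      clear hf
      induction row generalizing c s with
      | nil => cases c <;> rfl
      | cons x t ih =>
          cases c with
          | zero => rfl
          | succ c =>
              by_cases hx : x = "?" <;> simp [rowFillA, hx, ih]

theorem rowPassA_dichotomy (c : Nat) (row : List String) :
    isQ c (rowPassA c row) = true ∨ ∀ x ∈ (rowPassA c row).take c, x ≠ "?" := by
  unfold rowPassA
  cases hf : findFirstA row c with
  | none =>
      left
      have h := findFirstA_none row c hf
      simp [isQ, List.all_eq_true]
      intro x hx; exact h x hx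
  | some s =>
      right
      exact rowFillA_no_q row c s (findFirstA_some_ne row c s hf)

theorem okRows_rowsA (m : List (List String)) : ∀ (k c : Nat),
    (∀ row ∈ m.take k, c ≤ row.length) → okRows (rowsA m k c) k c := by
  induction m with
  | nil => intro k c _; cases k <;> trivial
  | cons row rest ih =>
      intro k c hlen; cases k with
      | zero => trivial
      | succ k =>
          simp at hlen
          refine ⟨⟨?_, rowPassA_dichotomy c row⟩, ih k c hlen.2⟩
          rw [rowPassA_length]; exact hlen.1

theorem isQ_mem (c : Nat) (row : List String) (h : isQ c row = true) :
    ∀ x ∈ row.take c, x = "?" := by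
  simp [isQ, List.all_eq_true] at h
  intro x hx; exact h x hx

theorem isQ_cell (c j : Nat) (row : List String) (h : isQ c row = true) (hj : j < c)
    (hlen : c ≤ row.length) : row[j]?.getD "?" = "?" := by
  have hjl : j < row.length := lt_of_lt_of_le hj hlen
  rw [List.getElem?_eq_getElem hjl]
  exact isQ_mem c row h _ (List.mem_take_iff_getElem.mpr ⟨j, by omega, rfl⟩)

theorem noQ_cell (c j : Nat) (row : List String) (h : ∀ x ∈ row.take c, x ≠ "?") (hj : j < c)
    (hlen : c ≤ row.length) : row[j]?.getD "?" ≠ "?" := by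
  have hjl : j < row.length := lt_of_lt_of_le hj hlen
  rw [List.getElem?_eq_getElem hjl]
  exact h _ (List.mem_take_iff_getElem.mpr ⟨j, by omega, rfl⟩)

theorem isQ_zero (row : List String) : isQ 0 row = true := by simp [isQ]

theorem firstDonor_spec (M : List (List String)) : ∀ (k c : Nat) (d : List String),
    okRows M k c → firstDonor M k c = some d →
    c ≤ d.length ∧ ∀ x ∈ d.take c, x ≠ "?" := by
  induction M with
  | nil => intro k c d _ h; cases k <;> simp [firstDonor] at h
  | cons row rest ih =>
      intro k c d hok h; cases k with
      | zero => simp [firstDonor] at h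
      | succ k =>
          obtain ⟨⟨hlen, hdi⟩, hrest⟩ := hok
          by_cases hq : isQ c row = true
          · simp [firstDonor, hq] at h
            exact ih k c d hrest h
          · simp [firstDonor, hq] at h
            subst h
            rcases hdi with hdi | hdi
            · exact absurd hdi hq
            · exact ⟨hlen, hdi⟩

-- the j-th cell of a partially filled all-"?" row is still "?"
theorem cellJ_q (j c : Nat) (row d : List String) (hq : isQ c row = true) (hj : j < c)
    (hlen : c ≤ row.length) (hd : j ≤ d.length) :
    (d.take j ++ row.drop j)[j]?.getD "?" = "?" := by
  have htl : (d.take j).length = j := by simp; omega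
  rw [List.getElem?_append_right (by omega), htl, Nat.sub_self, List.getElem?_drop]
  exact isQ_cell c j row hq hj hlen

-- writing the donor's j-th value extends the filled prefix by one column
theorem setJ_q (j c : Nat) (row d : List String) (hj : j < c)
    (hlen : c ≤ row.length) (hd : j < d.length) :
    (d.take j ++ row.drop j).set j (d.getD j "?") = d.take (j + 1) ++ row.drop (j + 1) := by
  have htl : (d.take j).length = j := by simp; omega
  have hjl : j < row.length := lt_of_lt_of_le hj hlen
  rw [List.set_append_right _ _ (by omega), htl, Nat.sub_self]
  have h1 : (List.drop j row).set 0 (d.getD j "?") = d[j] :: List.drop (j + 1) row := by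
    rw [List.drop_eq_getElem_cons hjl, List.set_cons_zero, List.getD_eq_getElem d "?" hd]
  have h2 : List.take (j + 1) d = List.take j d ++ [d[j]] := by
    rw [List.take_add_one, List.getElem?_eq_getElem hd]; rfl
  rw [h1, h2, List.append_assoc]
  rfl

theorem colFirstA_fillRowsJ (j c : Nat) (hj : j < c) : ∀ (M : List (List String)) (k : Nat) (d : List String),
    okRows M k c → j ≤ d.length →
    colFirstA (fillRowsJ j M k c d) k j =
      (firstDonor M k c).map (fun e => e.getD j "?") := by
  intro M
  induction M with
  | nil => intro k d _ _; cases k <;> rfl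
  | cons row rest ih =>
      intro k d hok hd; cases k with
      | zero => rfl
      | succ k =>
          obtain ⟨⟨hlen, hdi⟩, hrest⟩ := hok
          by_cases hq : isQ c row = true
          · have hc : (d.take j ++ row.drop j).getD j "?" = "?" := by
              rw [List.getD_eq_getElem?_getD]
              exact cellJ_q j c row d hq hj hlen hd
            rw [show fillRowsJ j (row :: rest) (k + 1) c d
                = (d.take j ++ row.drop j) :: fillRowsJ j rest k c d from by
              simp [fillRowsJ, hq]]
            rw [show firstDonor (row :: rest) (k + 1) c = firstDonor rest k c from by
              simp [firstDonor, hq]]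
            simp only [colFirstA, hc]
            rw [if_neg (by simp)]
            exact ih k d hrest hd
          · have hdi' : ∀ x ∈ row.take c, x ≠ "?" := by
              rcases hdi with h | h
              · exact absurd h hq
              · exact h
            have hc : row.getD j "?" ≠ "?" := by
              rw [List.getD_eq_getElem?_getD]
              exact noQ_cell c j row hdi' hj hlen
            rw [show fillRowsJ j (row :: rest) (k + 1) c d
                = row :: fillRowsJ j rest k c row from by
              simp [fillRowsJ, hq]]
            rw [show firstDonor (row :: rest) (k + 1) c = some row from by
              simp [firstDonor, hq]]
            simp only [colFirstA]
            rw [if_pos hc, Option.map_some]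

theorem colFillA_fillRowsJ (j c : Nat) (hj : j < c) : ∀ (M : List (List String)) (k : Nat) (d : List String),
    okRows M k c → j < d.length →
    colFillA (fillRowsJ j M k c d) k j (d.getD j "?") = fillRowsJ (j + 1) M k c d := by
  intro M
  induction M with
  | nil => intro k d _ _; cases k <;> rfl
  | cons row rest ih =>
      intro k d hok hd; cases k with
      | zero => rfl
      | succ k =>
          obtain ⟨⟨hlen, hdi⟩, hrest⟩ := hok
          by_cases hq : isQ c row = true
          · have hc : (d.take j ++ row.drop j).getD j "?" = "?" := by
              rw [List.getD_eq_getElem?_getD]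
              exact cellJ_q j c row d hq hj hlen (le_of_lt hd)
            rw [show fillRowsJ j (row :: rest) (k + 1) c d
                = (d.take j ++ row.drop j) :: fillRowsJ j rest k c d from by
              simp [fillRowsJ, hq]]
            rw [show fillRowsJ (j + 1) (row :: rest) (k + 1) c d
                = (d.take (j + 1) ++ row.drop (j + 1)) :: fillRowsJ (j + 1) rest k c d from by
              simp [fillRowsJ, hq]]
            simp only [colFillA, hc]
            rw [if_pos (by simp)]
            rw [setJ_q j c row d hj hlen hd]
            exact congrArg _ (ih k d hrest hd)
          · have hdi' : ∀ x ∈ row.take c, x ≠ "?" := by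
              rcases hdi with h | h
              · exact absurd h hq
              · exact h
            have hc : row.getD j "?" ≠ "?" := by
              rw [List.getD_eq_getElem?_getD]
              exact noQ_cell c j row hdi' hj hlen
            rw [show fillRowsJ j (row :: rest) (k + 1) c d
                = row :: fillRowsJ j rest k c row from by
              simp [fillRowsJ, hq]]
            rw [show fillRowsJ (j + 1) (row :: rest) (k + 1) c d
                = row :: fillRowsJ (j + 1) rest k c row from by
              simp [fillRowsJ, hq]]
            simp only [colFillA]
            rw [if_neg (by simpa using hc)]
            exact congrArg _ (ih k row hrest (by omega))

theorem colFirstA_allq (j c : Nat) (hj : j < c) : ∀ (M : List (List String)) (k : Nat),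
    okRows M k c → firstDonor M k c = none → colFirstA M k j = none := by
  intro M
  induction M with
  | nil => intro k _ _; cases k <;> rfl
  | cons row rest ih =>
      intro k hok hf; cases k with
      | zero => rfl
      | succ k =>
          obtain ⟨⟨hlen, _⟩, hrest⟩ := hok
          by_cases hq : isQ c row = true
          · simp [firstDonor, hq] at hf
            have hc : row.getD j "?" = "?" := by
              rw [List.getD_eq_getElem?_getD]
              exact isQ_cell c j row hq hj hlen
            simp only [colFirstA, hc]
            rw [if_neg (by simp)]
            exact ih k hrest hf
          · simp [firstDonor, hq] at hf

theorem colStepA_tbAt (M : List (List String)) (k c j : Nat) (hok : okRows M k c) (hj : j < c) :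
    colStepA (tbAt M k c j) k j = tbAt M k c (j + 1) := by
  unfold tbAt
  cases hf : firstDonor M k c with
  | none => simp [colStepA, colFirstA_allq j c hj M k hok hf]
  | some d =>
      have hd := firstDonor_spec M k c d hok hf
      have h1 := colFirstA_fillRowsJ j c hj M k d hok (by omega)
      rw [hf] at h1
      simp only [colStepA, h1, Option.map_some]
      exact colFillA_fillRowsJ j c hj M k d hok (by omega)

theorem fillRowsJ_zero : ∀ (M : List (List String)) (k c : Nat) (d : List String),
    fillRowsJ 0 M k c d = M := by
  intro M
  induction M with
  | nil => intro k c d; cases k <;> rfl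
  | cons row rest ih =>
      intro k c d; cases k with
      | zero => rfl
      | succ k =>
          by_cases hq : isQ c row = true <;> simp [fillRowsJ, hq, ih]

theorem tbAt_zero (M : List (List String)) (k c : Nat) : tbAt M k c 0 = M := by
  unfold tbAt
  cases firstDonor M k c with
  | none => rfl
  | some d => exact fillRowsJ_zero M k c d

theorem fold_tbAt (M : List (List String)) (k c : Nat) (hok : okRows M k c) :
    ∀ (t j : Nat), j + t ≤ c →
    (List.range' j t).foldl (fun acc jj => colStepA acc k jj) (tbAt M k c j) = tbAt M k c (j + t) := by
  intro t
  induction t with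
  | zero => intro j _; rfl
  | succ t ih =>
      intro j hjt
      rw [List.range'_succ]
      simp only [List.foldl_cons]
      rw [colStepA_tbAt M k c j hok (by omega)]
      have h2 := ih (j + 1) (by omega)
      rw [h2]
      congr 1
      omega

-- at j = c the partial fill is the full fill
theorem fillRowsJ_full (c : Nat) : ∀ (M : List (List String)) (k : Nat) (d : List String),
    okRows M k c → fillRowsJ c M k c d = fillRows M k c d := by
  intro M
  induction M with
  | nil => intro k d _; cases k <;> rfl
  | cons row rest ih =>
      intro k d hok; cases k with
      | zero => rfl
      | succ k =>
          obtain ⟨⟨hlen, _⟩, hrest⟩ := hok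
          by_cases hq : isQ c row = true
          · simp [fillRowsJ, fillRows, hq]
            exact ih k d hrest
          · simp [fillRowsJ, fillRows, hq]
            exact ih k row hrest

----------------------------------------------------------------
-- Phase 2, B side
----------------------------------------------------------------

-- the cell-by-cell copy loop writes the donor's first c cells over the row's
theorem copyC_aux (c : Nat) (d row : List String) (hlen : c ≤ row.length) (hd : c ≤ d.length) :
    ∀ (t j : Nat), j + t ≤ c →
    (List.range' j t).foldl (fun acc jj => acc.set jj (d.getD jj "?")) (d.take j ++ row.drop j)
      = d.take (j + t) ++ row.drop (j + t) := by
  intro t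
  induction t with
  | zero => intro j _; rfl
  | succ t ih =>
      intro j hjt
      rw [List.range'_succ]
      simp only [List.foldl_cons]
      rw [setJ_q j c row d (by omega) hlen (by omega)]
      have h2 := ih (j + 1) (by omega)
      rw [h2, show j + 1 + t = j + (t + 1) from by omega]

theorem copyC_eq (c : Nat) (d row : List String) (hlen : c ≤ row.length) (hd : c ≤ d.length) :
    copyC c d row = d.take c ++ row.drop c := by
  have h := copyC_aux c d row hlen hd c 0 (by omega)
  simpa [copyC, List.range_eq_range'] using h

-- the forward row sweep with a donor in hand is exactly the running fill
theorem fwdRowsB_some : ∀ (M : List (List String)) (k c : Nat) (d : List String),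
    okRows M k c → c ≤ d.length → fwdRowsB M k c (some d) = fillRows M k c d := by
  intro M
  induction M with
  | nil => intro k c d _ _; cases k <;> rfl
  | cons row rest ih =>
      intro k c d hok hd; cases k with
      | zero => rfl
      | succ k =>
          obtain ⟨⟨hlen, hdi⟩, hrest⟩ := hok
          by_cases hq : isQ c row = true
          · simp [fwdRowsB, fillRows, hq, copyC_eq c d row hlen hd]
            exact ih k c d hrest hd
          · simp [fwdRowsB, fillRows, hq]
            exact ih k c row hrest hlen

-- a filled prefix is not all-"?" (c > 0)
theorem isQ_filled_false (c : Nat) (hc : 0 < c) (d tail : List String)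
    (hd : c ≤ d.length) (hdq : ∀ x ∈ d.take c, x ≠ "?") : isQ c (d.take c ++ tail) = false := by
  have hl : (d.take c).length = c := by simp; omega
  have hne : d.take c ≠ [] := by intro h; rw [h] at hl; simp at hl; omega
  obtain ⟨y, t, he⟩ := List.exists_cons_of_ne_nil hne
  have hy : y ∈ d.take c := by rw [he]; simp
  rw [he]
  cases c with
  | zero => omega
  | succ c =>
      simp [isQ]
      intro h
      exact absurd h (hdq y hy)

-- after the forward sweep every row is filled, so the backward sweep changes nothing
theorem bwdRowsB_fst_filled : ∀ (M : List (List String)) (k c : Nat) (d : List String),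
    okRows M k c → 0 < c → c ≤ d.length → (∀ x ∈ d.take c, x ≠ "?") →
    (bwdRowsB (fillRows M k c d) k c).1 = fillRows M k c d := by
  intro M
  induction M with
  | nil => intro k c d _ _ _ _; cases k <;> rfl
  | cons row rest ih =>
      intro k c d hok hc hd hdq; cases k with
      | zero => rfl
      | succ k =>
          obtain ⟨⟨hlen, hdi⟩, hrest⟩ := hok
          by_cases hq : isQ c row = true
          · simp [fillRows, hq, bwdRowsB, isQ_filled_false c hc d _ hd hdq]
            exact ih k c d hrest hc hd hdq
          · have hdi' : ∀ x ∈ row.take c, x ≠ "?" := by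
              rcases hdi with h | h
              · exact absurd h hq
              · exact h
            simp [fillRows, hq, bwdRowsB]
            exact ih k c row hrest hc hlen hdi'

-- the composed row sweeps, expressed through the first filled row
theorem bwd_fwd_rows_char : ∀ (M : List (List String)) (k c : Nat),
    okRows M k c →
    bwdRowsB (fwdRowsB M k c none) k c =
      (match firstDonor M k c with
       | none => (M, none)
       | some d => (fillRows M k c d, some d)) := by
  intro M
  induction M with
  | nil => intro k c _; cases k <;> rfl
  | cons row rest ih =>
      intro k c hok; cases k with
      | zero => rfl
      | succ k =>
          obtain ⟨⟨hlen, hdi⟩, hrest⟩ := hok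
          by_cases hq : isQ c row = true
          · have h1 : fwdRowsB (row :: rest) (k + 1) c none = row :: fwdRowsB rest k c none := by
              simp [fwdRowsB, hq]
            rw [h1]
            cases hf : firstDonor rest k c with
            | none =>
                have hih := ih k c hrest; rw [hf] at hih
                simp [firstDonor, bwdRowsB, hq, hih, hf]
            | some d =>
                have hih := ih k c hrest; rw [hf] at hih
                have hd := firstDonor_spec rest k c d hrest hf
                simp [firstDonor, bwdRowsB, hq, hih, hf, fillRows,
                  copyC_eq c d row hlen hd.1]
          · have h1 : fwdRowsB (row :: rest) (k + 1) c none
                = row :: fillRows rest k c row := by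
              simp [fwdRowsB, hq, fwdRowsB_some rest k c row hrest hlen]
            rw [h1]
            have hdi' : ∀ x ∈ row.take c, x ≠ "?" := by
              rcases hdi with h | h
              · exact absurd h hq
              · exact h
            have hc : 0 < c := by
              rcases Nat.eq_zero_or_pos c with h0 | h0
              · subst h0; simp [isQ_zero] at hq
              · exact h0
            have h2 := bwdRowsB_fst_filled rest k c row hrest hc hlen hdi'
            simp [firstDonor, bwdRowsB, hq, h2, fillRows]

----------------------------------------------------------------
-- Phase 2: A's column fold = B's two row sweeps
----------------------------------------------------------------

theorem phase2_eq (M : List (List String)) (k c : Nat) (hok : okRows M k c) :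
    (List.range c).foldl (fun acc j => colStepA acc k j) M
      = (bwdRowsB (fwdRowsB M k c none) k c).1 := by
  have hA : (List.range c).foldl (fun acc j => colStepA acc k j) M = tbAt M k c c := by
    rw [List.range_eq_range']
    have h0 := fold_tbAt M k c hok c 0 (by omega)
    rw [tbAt_zero] at h0
    simpa using h0
  rw [hA, bwd_fwd_rows_char M k c hok]
  unfold tbAt
  cases hf : firstDonor M k c with
  | none => rfl
  | some d => simp [fillRowsJ_full c M k d hok]

-- ===== VERDICT (by name: the statement is the Claim_ definition above) =====
theorem solve_spec : Claim_equal_solve := by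
  intro r c m _ hpre
  have hlen : ∀ row ∈ m.take r.toNat, c.toNat ≤ row.length := by
    by_cases hc : 0 < c
    · exact (hpre.1 hc).2
    · have h0 : c.toNat = 0 := Int.toNat_of_nonpos (le_of_not_gt hc)
      intro row _; omega
  unfold Spec_solve solve solve_alt
  rw [← rows_eq]
  exact phase2_eq (rowsA m r.toNat c.toNat) r.toNat c.toNat
    (okRows_rowsA m r.toNat c.toNat hlen)
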